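-- pv_equiv track=rewrite | github.com/vimself/ZhongMeiRagProject2.0 | GlmOcrApi/quality_repair.py | _section_parts_can_reduce_to
-- ===== SOURCE A (Python) =====
-- def _section_parts_can_reduce_to(parts: list[str], target: list[str]) -> bool:
--     if parts == target:
--         return True
--     if len(parts) <= len(target) or len(parts) > 10:
--         return False
--     seen: set[tuple[str, ...]] = set()
--     queue: list[list[str]] = [parts]
--     while queue:
--         current = queue.pop(0)
--         key = tuple(current)
--         if key in seen:
--             continue
--         seen.add(key)
--         if current == target:
--             return True
--         if len(current) <= len(target):
--             continue
--         for start in range(len(current)):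
--             max_size = (len(current) - start) // 2
--             for size in range(max_size, 0, -1):
--                 left = current[start : start + size]
--                 right = current[start + size : start + 2 * size]
--                 if left != right:
--                     continue
--                 candidate = current[: start + size] + current[start + 2 * size :]
--                 if len(candidate) >= len(target):
--                     queue.append(candidate)
--     return False
-- ===== SOURCE B (Python) =====
-- def _section_parts_can_reduce_to(parts: list[str], target: list[str]) -> bool:
--     if parts == target:
--         return True
--     if len(parts) <= len(target) or len(parts) > 10:
--         return False
--     failed: set[tuple[str, ...]] = set()
--
--     def reach(current: list[str]) -> bool:
--         key = tuple(current)
--         if key in failed: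
--             return False
--         if current == target:
--             return True
--         if len(current) > len(target):
--             candidates = [
--                 current[:s + z] + current[s + 2 * z:]
--                 for s in range(len(current))
--                 for z in range(1, (len(current) - s) // 2 + 1)
--                 if current[s:s + z] == current[s + z:s + 2 * z]
--             ]
--             for cand in candidates:
--                 if len(cand) >= len(target) and reach(cand):
--                     return True
--         failed.add(key)
--         return False
--
--     return reach(parts)
-- ===== Notes on version B (the rewrite author's own statement) =====
-- stated objective: alternative
-- what changed: Replaced the FIFO-queue breadth-first search over collapse states with a recursive depth-first search that memoizes failed states in a set; reachability on this length-decreasing (acyclic) state graph is order-independent, so the boolean result is identical.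
import Mathlib
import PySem

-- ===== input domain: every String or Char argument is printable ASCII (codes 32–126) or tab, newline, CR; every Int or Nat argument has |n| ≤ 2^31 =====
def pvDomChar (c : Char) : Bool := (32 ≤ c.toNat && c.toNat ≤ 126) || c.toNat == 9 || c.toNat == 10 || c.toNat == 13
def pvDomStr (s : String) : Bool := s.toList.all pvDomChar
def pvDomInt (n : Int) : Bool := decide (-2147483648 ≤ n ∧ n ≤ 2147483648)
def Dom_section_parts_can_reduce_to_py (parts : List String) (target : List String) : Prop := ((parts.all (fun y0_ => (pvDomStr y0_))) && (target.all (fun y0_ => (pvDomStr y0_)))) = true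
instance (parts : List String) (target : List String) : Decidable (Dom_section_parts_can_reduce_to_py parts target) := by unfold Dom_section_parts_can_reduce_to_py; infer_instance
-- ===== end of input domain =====

-- B replaces A's FIFO-queue breadth-first search with a recursive depth-first search memoizing failed
-- states (objective: alternative; reachability on the length-decreasing state graph is order-independent).

-- `IsCand c x`: x is one of the "collapse a duplicated adjacent block" candidates both programs generate
-- from c (start s, block size z, the two adjacent z-blocks are equal, x = c with the second block removed).
def IsCand (c x : List String) : Prop :=
  ∃ s z : Nat, s < c.length ∧ 1 ≤ z ∧ s + 2 * z ≤ c.length ∧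
    (c.drop s).take z = (c.drop (s + z)).take z ∧
    x = c.take (s + z) ++ c.drop (s + 2 * z)

lemma IsCand_length {c x : List String} (h : IsCand c x) : x.length < c.length := by
  obtain ⟨s, z, hs, hz, hb, _, hx⟩ := h
  subst hx
  simp [List.length_take, List.length_drop]
  omega

lemma IsCand_sublist {c x : List String} (h : IsCand c x) : x.Sublist c := by
  obtain ⟨s, z, hs, hz, hb, _, hx⟩ := h
  subst hx
  have h1 : c.drop (s + 2 * z) = (c.drop (s + z)).drop z := by
    rw [List.drop_drop]; ring_nf
  have h2 : (c.take (s + z) ++ c.drop (s + 2 * z)).Sublist (c.take (s + z) ++ c.drop (s + z)) := by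
    rw [h1]; exact (List.drop_sublist z _).append_left _
  have h3 : c.take (s + z) ++ c.drop (s + z) = c := List.take_append_drop _ _
  have h4 : (c.take (s + z) ++ c.drop (s + z)).Sublist c := by
    rw [h3]
  exact h2.trans h4

lemma mem_if_singleton {α : Type} {x y : α} {c : Prop} [Decidable c] :
    x ∈ (if c then [y] else ([] : List α)) ↔ c ∧ x = y := by
  split <;> simp [*]

-- core: Int-indexed candidate description = IsCand

lemma cand_core {current x : List String} :
    (∃ s : Int, (0 ≤ s ∧ s < (current.length : Int)) ∧ ∃ z : Int,
      (1 ≤ z ∧ z ≤ PySem.Int.floordiv ((current.length : Int) - s) 2) ∧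
      (PySem.List.slice current (some s) (some (s + z)) =
        PySem.List.slice current (some (s + z)) (some (s + 2 * z))) ∧
      x = PySem.List.slice current none (some (s + z)) ++
        PySem.List.slice current (some (s + 2 * z)) none)
    ↔ IsCand current x := by
  constructor
  · rintro ⟨s, ⟨hs0, hsn⟩, z, ⟨hz1, hz2⟩, heq, rfl⟩
    obtain ⟨s', rfl⟩ := Int.eq_ofNat_of_zero_le hs0
    obtain ⟨z', rfl⟩ := Int.eq_ofNat_of_zero_le (by omega : (0:Int) ≤ z)
    have hsn' : s' < current.length := by exact_mod_cast hsn
    have hfd : PySem.Int.floordiv ((current.length : Int) - s') 2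
        = ((current.length - s') / 2 : Nat) := by
      rw [show ((current.length : Int) - s') = ((current.length - s' : Nat) : Int) by omega]
      exact_mod_cast PySem.Int.floordiv_natCast (current.length - s') 2
    have hz2' : z' ≤ (current.length - s') / 2 := by
      rw [hfd] at hz2; exact_mod_cast hz2
    have hb : s' + 2 * z' ≤ current.length := by omega
    refine ⟨s', z', hsn', by exact_mod_cast hz1, hb, ?_, ?_⟩
    · have e1 : PySem.List.slice current (some (s' : Int)) (some ((s' : Int) + z')) =
        (current.drop s').take z' := by
        rw [show ((s' : Int) + z') = ((s' : Int) + (z' : Int)) from rfl]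
        exact PySem.List.slice_natCast_add current s' z'
      have e2 : PySem.List.slice current (some ((s' : Int) + z')) (some ((s' : Int) + 2 * z')) =
        (current.drop (s' + z')).take z' := by
        rw [show ((s' : Int) + (z' : Int)) = ((s' + z' : Nat) : Int) by push_cast; ring,
            show ((s' : Int) + 2 * (z' : Int)) = (((s' + z' : Nat) : Int) + (z' : Nat)) by push_cast; ring]
        exact PySem.List.slice_natCast_add current (s' + z') z'
      rw [e1, e2] at heq; exact heq
    · rw [show ((s' : Int) + (z' : Int)) = ((s' + z' : Nat) : Int) by push_cast; ring,
          show ((s' : Int) + 2 * (z' : Int)) = ((s' + 2 * z' : Nat) : Int) by push_cast; ring,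
          PySem.List.slice_to_natCast, PySem.List.slice_from_natCast]
  · rintro ⟨s', z', hsn, hz1, hb, heq, rfl⟩
    refine ⟨(s' : Int), ⟨by positivity, by exact_mod_cast hsn⟩, (z' : Int),
      ⟨by exact_mod_cast hz1, ?_⟩, ?_, ?_⟩
    · have hfd : PySem.Int.floordiv ((current.length : Int) - s') 2
        = ((current.length - s') / 2 : Nat) := by
        rw [show ((current.length : Int) - s') = ((current.length - s' : Nat) : Int) by omega]
        exact_mod_cast PySem.Int.floordiv_natCast (current.length - s') 2
      rw [hfd]
      have : z' ≤ (current.length - s') / 2 := by omega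
      exact_mod_cast this
    · rw [show ((s' : Int) + (z' : Int)) = ((s' : Int) + (z' : Int)) from rfl]
      have e1 : PySem.List.slice current (some (s' : Int)) (some ((s' : Int) + z')) =
        (current.drop s').take z' := by
        rw [show ((s' : Int) + z') = ((s' : Int) + (z' : Int)) from rfl]
        exact PySem.List.slice_natCast_add current s' z'
      have e2 : PySem.List.slice current (some ((s' : Int) + z')) (some ((s' : Int) + 2 * z')) =
        (current.drop (s' + z')).take z' := by
        rw [show ((s' : Int) + (z' : Int)) = ((s' + z' : Nat) : Int) by push_cast; ring,
            show ((s' : Int) + 2 * (z' : Int)) = (((s' + z' : Nat) : Int) + (z' : Nat)) by push_cast; ring]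
        exact PySem.List.slice_natCast_add current (s' + z') z'
      rw [e1, e2]; exact heq
    · rw [show ((s' : Int) + (z' : Int)) = ((s' + z' : Nat) : Int) by push_cast; ring,
          show ((s' : Int) + 2 * (z' : Int)) = ((s' + 2 * z' : Nat) : Int) by push_cast; ring,
          PySem.List.slice_to_natCast, PySem.List.slice_from_natCast]

-- x ∈ pyRange a b (-1) ↔ b < x ≤ a  (the descending range A's inner loop walks)
lemma mem_pyRange_neg_one {a b x : Int} : x ∈ PySem.List.pyRange a b (-1) ↔ b < x ∧ x ≤ a := by
  unfold PySem.List.pyRange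
  by_cases h : b < a
  · simp only [h, if_true]
    norm_num [List.mem_map, List.mem_range]
    constructor
    · rintro ⟨k, hk, rfl⟩; omega
    · rintro ⟨h1, h2⟩; exact ⟨(a - x).toNat, by omega, by omega⟩
  · simp only [h, if_false]
    norm_num [List.mem_map, List.mem_range]
    intro h1; omega

-- ===== PORT A =====
-- the two nested `for start / for size` loops of A's while-body, appending candidates to the queue
def stepGenA (target current : List String) (queue : List (List String)) : List (List String) :=
  (PySem.List.pyRange 0 (current.length : Int) 1).foldl (fun q start =>
    (PySem.List.pyRange (PySem.Int.floordiv ((current.length : Int) - start) 2) 0 (-1)).foldl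
      (fun q size =>
        let left := PySem.List.slice current (some start) (some (start + size))
        let right := PySem.List.slice current (some (start + size)) (some (start + 2 * size))
        if left ≠ right then q
        else
          let candidate := PySem.List.slice current none (some (start + size)) ++
            PySem.List.slice current (some (start + 2 * size)) none
          if target.length ≤ candidate.length then q ++ [candidate] else q) q) queue

-- foldl-with-append form of the nested loops, as one flatMap
lemma stepGenA_eq (target current : List String) (queue : List (List String)) :
    stepGenA target current queue = queue ++
      (PySem.List.pyRange 0 (current.length : Int) 1).flatMap (fun s =>
        (PySem.List.pyRange (PySem.Int.floordiv ((current.length : Int) - s) 2) 0 (-1)).flatMap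
          (fun z =>
            if PySem.List.slice current (some s) (some (s + z)) =
                  PySem.List.slice current (some (s + z)) (some (s + 2 * z)) ∧
                target.length ≤ (PySem.List.slice current none (some (s + z)) ++
                  PySem.List.slice current (some (s + 2 * z)) none).length then
              [PySem.List.slice current none (some (s + z)) ++
                PySem.List.slice current (some (s + 2 * z)) none]
            else [])) := by
  unfold stepGenA
  have hinner : ∀ (s : Int) (q : List (List String)),
      (PySem.List.pyRange (PySem.Int.floordiv ((current.length : Int) - s) 2) 0 (-1)).foldl
        (fun q size =>
          let left := PySem.List.slice current (some s) (some (s + size))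
          let right := PySem.List.slice current (some (s + size)) (some (s + 2 * size))
          if left ≠ right then q
          else
            let candidate := PySem.List.slice current none (some (s + size)) ++
              PySem.List.slice current (some (s + 2 * size)) none
            if target.length ≤ candidate.length then q ++ [candidate] else q) q
      = q ++ (PySem.List.pyRange (PySem.Int.floordiv ((current.length : Int) - s) 2) 0 (-1)).flatMap
          (fun z =>
            if PySem.List.slice current (some s) (some (s + z)) =
                  PySem.List.slice current (some (s + z)) (some (s + 2 * z)) ∧
                target.length ≤ (PySem.List.slice current none (some (s + z)) ++
                  PySem.List.slice current (some (s + 2 * z)) none).length then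
              [PySem.List.slice current none (some (s + z)) ++
                PySem.List.slice current (some (s + 2 * z)) none]
            else []) := by
    intro s q
    rw [← PySem.List.foldl_append_eq_flatMap]
    congr 1
    funext q' z
    by_cases h1 : PySem.List.slice current (some s) (some (s + z)) =
        PySem.List.slice current (some (s + z)) (some (s + 2 * z))
    · simp only [h1, ne_eq, not_true_eq_false, if_false]
      split <;> simp_all
    · simp [h1]
  refine Eq.trans (List.foldl_ext _ _ queue (fun q s _ => hinner s q)) ?_
  exact PySem.List.foldl_append_eq_flatMap _ _ _

-- membership in the generated queue (cited by bfsA's sublist bookkeeping and by the proofs below)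
lemma mem_stepGenA {target current : List String} {queue : List (List String)} {x : List String} :
    x ∈ stepGenA target current queue ↔
      x ∈ queue ∨ (IsCand current x ∧ target.length ≤ x.length) := by
  rw [stepGenA_eq]
  simp only [List.mem_append, List.mem_flatMap, PySem.List.mem_pyRange_one,
    mem_pyRange_neg_one, mem_if_singleton]
  apply or_congr Iff.rfl
  constructor
  · rintro ⟨s, hs, z, hz, ⟨hc, hl⟩, rfl⟩
    exact ⟨cand_core.mp ⟨s, hs, z, ⟨by omega, hz.2⟩, hc, rfl⟩, hl⟩
  · rintro ⟨hic, hl⟩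
    obtain ⟨s, hs, z, hz, hc, hx⟩ := cand_core.mpr hic
    exact ⟨s, hs, z, ⟨by omega, hz.2⟩, ⟨hc, hx ▸ hl⟩, hx⟩

-- termination measure for the BFS: a fresh key enters `seen`, so the unseen sublists shrink
lemma seen_card_lt (parts : List String) (seen : PySem.Set (List String)) (c : List String)
    (hc : c.Sublist parts) (hns : c ∉ seen) :
    (Finset.filter (fun s => s ∉ PySem.Set.add seen c) parts.sublists.toFinset).card <
      (Finset.filter (fun s => s ∉ seen) parts.sublists.toFinset).card := by
  apply Finset.card_lt_card
  constructor
  · intro s hs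
    simp only [Finset.mem_filter, PySem.Set.mem_add] at *
    tauto
  · intro hsub
    have hc1 : c ∈ Finset.filter (fun s => s ∉ seen) parts.sublists.toFinset := by
      simp only [Finset.mem_filter, List.mem_toFinset, List.mem_sublists]
      exact ⟨hc, hns⟩
    have := hsub hc1
    simp only [Finset.mem_filter, PySem.Set.mem_add] at this
    tauto

-- the `while queue:` loop of A (queue, seen); hq carries the invariant every queue entry is a
-- sublist of parts, which bounds the set of keys `seen` can ever receive (termination only)
def bfsA (target parts : List String) (queue : List (List String))
    (seen : PySem.Set (List String)) (hq : ∀ c ∈ queue, c.Sublist parts) : Bool :=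
  match queue with
  | [] => false
  | current :: rest =>
    if hseen : current ∈ seen then
      bfsA target parts rest seen (fun c hc => hq c (List.mem_cons_of_mem _ hc))
    else
      if current = target then true
      else if current.length ≤ target.length then
        bfsA target parts rest (PySem.Set.add seen current)
          (fun c hc => hq c (List.mem_cons_of_mem _ hc))
      else
        bfsA target parts (stepGenA target current rest) (PySem.Set.add seen current)
          (fun c hc => by
            rcases mem_stepGenA.mp hc with h | h
            · exact hq c (List.mem_cons_of_mem _ h)
            · exact (IsCand_sublist h.1).trans (hq current List.mem_cons_self))
  termination_by ((Finset.filter (fun s => s ∉ seen) parts.sublists.toFinset).card, queue.length)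
  decreasing_by
  · exact Prod.Lex.right _ (by simp)
  · exact Prod.Lex.left _ _ (seen_card_lt parts seen current (hq current List.mem_cons_self) hseen)
  · exact Prod.Lex.left _ _ (seen_card_lt parts seen current (hq current List.mem_cons_self) hseen)

def section_parts_can_reduce_to_py (parts : List String) (target : List String) : Bool :=
  if parts = target then true
  else if parts.length ≤ target.length ∨ 10 < parts.length then false
  else
    bfsA target parts [parts] PySem.Set.empty
      (fun c hc => by rw [List.mem_singleton] at hc; exact hc ▸ List.Sublist.refl parts)

-- ===== PORT B =====
-- the candidate list comprehension of B
def candsB (current : List String) : List (List String) :=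
  (PySem.List.pyRange 0 (current.length : Int) 1).flatMap (fun s =>
    (PySem.List.pyRange 1 (PySem.Int.floordiv ((current.length : Int) - s) 2 + 1) 1).flatMap
      (fun z =>
        if PySem.List.slice current (some s) (some (s + z)) =
            PySem.List.slice current (some (s + z)) (some (s + 2 * z)) then
          [PySem.List.slice current none (some (s + z)) ++
            PySem.List.slice current (some (s + 2 * z)) none]
        else []))

lemma mem_candsB {current x : List String} : x ∈ candsB current ↔ IsCand current x := by
  rw [← cand_core]
  simp only [candsB, List.mem_flatMap, PySem.List.mem_pyRange_one, mem_if_singleton]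
  constructor
  · rintro ⟨s, hs, z, hz, hc, rfl⟩
    exact ⟨s, hs, z, ⟨hz.1, by omega⟩, hc, rfl⟩
  · rintro ⟨s, hs, z, hz, hc, rfl⟩
    exact ⟨s, hs, z, ⟨hz.1, by omega⟩, hc, rfl⟩

lemma candsB_length_lt {current x : List String} (h : x ∈ candsB current) :
    x.length < current.length :=
  IsCand_length (mem_candsB.mp h)

mutual
-- B's recursive `reach(current)` (threading the mutable `failed` set through)
def dfsB (target c : List String) (failed : PySem.Set (List String)) :
    Bool × PySem.Set (List String) :=
  if c ∈ failed then (false, failed)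
  else if c = target then (true, failed)
  else if target.length < c.length then
    if (dfsGo target c.length (candsB c) (fun _ hx => candsB_length_lt hx) failed).1 = true then
      dfsGo target c.length (candsB c) (fun _ hx => candsB_length_lt hx) failed
    else (false, PySem.Set.add
      (dfsGo target c.length (candsB c) (fun _ hx => candsB_length_lt hx) failed).2 c)
  else (false, PySem.Set.add failed c)
  termination_by (c.length + 1, 0)
  decreasing_by
    all_goals exact Prod.Lex.left _ _ (Nat.lt_succ_self _)

-- B's `for cand in candidates:` loop; h bounds the candidates' lengths (termination only)
def dfsGo (target : List String) (n : Nat) (cs : List (List String))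
    (h : ∀ x ∈ cs, x.length < n) (failed : PySem.Set (List String)) :
    Bool × PySem.Set (List String) :=
  match cs with
  | [] => (false, failed)
  | cand :: rest =>
    if target.length ≤ cand.length then
      if (dfsB target cand failed).1 = true then dfsB target cand failed
      else dfsGo target n rest (fun x hx => h x (List.mem_cons_of_mem _ hx))
        (dfsB target cand failed).2
    else dfsGo target n rest (fun x hx => h x (List.mem_cons_of_mem _ hx)) failed
  termination_by (n, cs.length)
  decreasing_by
    all_goals first
      | exact Prod.Lex.right _ (by simp)
      | { have hc : cand.length < n := h cand List.mem_cons_self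
          rcases Nat.lt_or_ge (cand.length + 1) n with h' | h'
          · exact Prod.Lex.left _ _ h'
          · have he : cand.length + 1 = n := le_antisymm hc h'
            exact he ▸ Prod.Lex.right _ (by simp) }
end

def section_parts_can_reduce_to_py_alt (parts : List String) (target : List String) : Bool :=
  if parts = target then true
  else if parts.length ≤ target.length ∨ 10 < parts.length then false
  else (dfsB target parts PySem.Set.empty).1

-- ===== PRECONDITION & SPEC =====
def Spec_section_parts_can_reduce_to_py (parts : List String) (target : List String) (out : Bool) : Prop := out = section_parts_can_reduce_to_py_alt parts target
instance (parts : List String) (target : List String) (out : Bool) : Decidable (Spec_section_parts_can_reduce_to_py parts target out) := by unfold Spec_section_parts_can_reduce_to_py; infer_instance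

-- ===== CLAIM (what is proved, stated in full; the proofs are below) =====
def Claim_equal_section_parts_can_reduce_to_py : Prop := ∀ (parts : List String) (target : List String), Dom_section_parts_can_reduce_to_py parts target → Spec_section_parts_can_reduce_to_py parts target (section_parts_can_reduce_to_py parts target)

-- ===== LEMMAS AND PROOFS =====

-- `Reach target c`: c collapses to target through candidates that never get shorter than target
def Reach (target : List String) (c : List String) : Prop :=
  c = target ∨ (target.length < c.length ∧
    ∃ x, ∃ _h : IsCand c x ∧ target.length ≤ x.length ∧ x.length < c.length, Reach target x)
  termination_by c.length
  decreasing_by exact _h.2.2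

lemma Reach_iff {target c : List String} :
    Reach target c ↔ c = target ∨ (target.length < c.length ∧
      ∃ x, IsCand c x ∧ target.length ≤ x.length ∧ Reach target x) := by
  rw [Reach]
  constructor
  · rintro (h | ⟨hl, x, ⟨h1, h2, _⟩, hr⟩)
    · exact Or.inl h
    · exact Or.inr ⟨hl, x, h1, h2, hr⟩
  · rintro (h | ⟨hl, x, h1, h2, hr⟩)
    · exact Or.inl h
    · exact Or.inr ⟨hl, x, ⟨h1, h2, IsCand_length h1⟩, hr⟩

-- ---- A's BFS computes Reach ----

def InvA (target : List String) (seen queue : List (List String)) : Prop :=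
  target ∉ seen ∧
    ∀ s ∈ seen, target.length < s.length →
      ∀ x, IsCand s x → target.length ≤ x.length → x ∈ seen ∨ x ∈ queue

-- a seen state that reaches target yields a strictly shorter queue state that reaches target
lemma seen_reach {target : List String} {seen queue : List (List String)}
    (hInv : InvA target seen queue) :
    ∀ n s, s.length ≤ n → s ∈ seen → Reach target s →
      ∃ q ∈ queue, Reach target q ∧ q.length < s.length := by
  intro n
  induction n with
  | zero =>
    intro s hn hs hr
    rcases Reach_iff.mp hr with rfl | ⟨hl, _, _, _, _⟩
    · exact absurd hs hInv.1
    · omega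
  | succ n ih =>
    intro s hn hs hr
    rcases Reach_iff.mp hr with rfl | ⟨hl, x, hic, hxl, hxr⟩
    · exact absurd hs hInv.1
    · have hlen := IsCand_length hic
      rcases hInv.2 s hs hl x hic hxl with hxs | hxq
      · obtain ⟨q, hq, hqr, hql⟩ := ih x (by omega) hxs hxr
        exact ⟨q, hq, hqr, by omega⟩
      · exact ⟨x, hxq, hxr, hlen⟩

lemma bfsA_eq_reach (target parts : List String) :
    ∀ queue seen hq, InvA target seen queue →
      (bfsA target parts queue seen hq = true ↔ ∃ q ∈ queue, Reach target q) := by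
  intro queue seen hq
  induction queue, seen, hq using bfsA.induct target parts with
  | case1 seen hq _ => simp [bfsA]
  | case2 seen current rest hq hseen _ ih =>
    intro hInv
    have hInv' : InvA target seen rest := by
      refine ⟨hInv.1, fun s hs hl x hic hxl => ?_⟩
      rcases hInv.2 s hs hl x hic hxl with h | h
      · exact Or.inl h
      · rcases List.mem_cons.mp h with rfl | h2
        · exact Or.inl hseen
        · exact Or.inr h2
    rw [bfsA, dif_pos hseen, ih hInv']
    constructor
    · rintro ⟨q, hq, hr⟩
      exact ⟨q, List.mem_cons_of_mem _ hq, hr⟩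
    · rintro ⟨q, hq, hr⟩
      rcases List.mem_cons.mp hq with rfl | h
      · obtain ⟨q', hq', hr', hl'⟩ := seen_reach hInv q.length q le_rfl hseen hr
        rcases List.mem_cons.mp hq' with rfl | h2
        · omega
        · exact ⟨q', h2, hr'⟩
      · exact ⟨q, h, hr⟩
  | case3 seen rest hq hseen _ =>
    intro _
    rw [bfsA, dif_neg hseen, if_pos rfl]
    simp only [true_iff]
    exact ⟨target, List.mem_cons_self, Reach_iff.mpr (Or.inl rfl)⟩
  | case4 seen current rest hq hseen hne hle _ ih =>
    intro hInv
    have hInv' : InvA target (PySem.Set.add seen current) rest := by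
      constructor
      · intro ht
        rcases (PySem.Set.mem_add seen current target).mp ht with h | h
        · exact hInv.1 h
        · exact hne h.symm
      · intro s hs hl x hic hxl
        rcases (PySem.Set.mem_add seen current s).mp hs with hs' | rfl
        · rcases hInv.2 s hs' hl x hic hxl with h | h
          · exact Or.inl ((PySem.Set.mem_add seen current x).mpr (Or.inl h))
          · rcases List.mem_cons.mp h with rfl | h2
            · exact Or.inl ((PySem.Set.mem_add seen x x).mpr (Or.inr rfl))
            · exact Or.inr h2
        · omega
    rw [bfsA, dif_neg hseen, if_neg hne, if_pos hle, ih hInv']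
    constructor
    · rintro ⟨q, hq, hr⟩
      exact ⟨q, List.mem_cons_of_mem _ hq, hr⟩
    · rintro ⟨q, hq, hr⟩
      rcases List.mem_cons.mp hq with rfl | h
      · rcases Reach_iff.mp hr with rfl | ⟨hl, _, _, _, _⟩
        · exact absurd rfl hne
        · omega
      · exact ⟨q, h, hr⟩
  | case5 seen current rest hq hseen hne hgt _ ih =>
    intro hInv
    have hgt' : target.length < current.length := by omega
    have hInv' : InvA target (PySem.Set.add seen current) (stepGenA target current rest) := by
      constructor
      · intro ht
        rcases (PySem.Set.mem_add seen current target).mp ht with h | h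
        · exact hInv.1 h
        · exact hne h.symm
      · intro s hs hl x hic hxl
        rcases (PySem.Set.mem_add seen current s).mp hs with hs' | rfl
        · rcases hInv.2 s hs' hl x hic hxl with h | h
          · exact Or.inl ((PySem.Set.mem_add seen current x).mpr (Or.inl h))
          · rcases List.mem_cons.mp h with rfl | h2
            · exact Or.inl ((PySem.Set.mem_add seen x x).mpr (Or.inr rfl))
            · exact Or.inr (mem_stepGenA.mpr (Or.inl h2))
        · exact Or.inr (mem_stepGenA.mpr (Or.inr ⟨hic, hxl⟩))
    rw [bfsA, dif_neg hseen, if_neg hne, if_neg hgt, ih hInv']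
    constructor
    · rintro ⟨q, hq, hr⟩
      rcases mem_stepGenA.mp hq with h | ⟨hic, hxl⟩
      · exact ⟨q, List.mem_cons_of_mem _ h, hr⟩
      · exact ⟨current, List.mem_cons_self,
          Reach_iff.mpr (Or.inr ⟨hgt', q, hic, hxl, hr⟩)⟩
    · rintro ⟨q, hq, hr⟩
      rcases List.mem_cons.mp hq with rfl | h
      · rcases Reach_iff.mp hr with rfl | ⟨hl, x, hic, hxl, hxr⟩
        · exact absurd rfl hne
        · exact ⟨x, mem_stepGenA.mpr (Or.inr ⟨hic, hxl⟩), hxr⟩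
      · exact ⟨q, mem_stepGenA.mpr (Or.inl h), hr⟩

-- ---- B's DFS computes Reach ----

def InvB (target : List String) (failed : List (List String)) : Prop :=
  ∀ s ∈ failed, ¬ Reach target s

-- B's loop over the candidate list, given the recursive calls are already correct
lemma dfsGo_eq_reach (target : List String) (n : Nat)
    (IH : ∀ x, x.length < n → ∀ failed, InvB target failed →
      ((dfsB target x failed).1 = true ↔ Reach target x) ∧ InvB target (dfsB target x failed).2) :
    ∀ cs (h : ∀ x ∈ cs, x.length < n) failed, InvB target failed →
      ((dfsGo target n cs h failed).1 = true ↔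
        ∃ x ∈ cs, target.length ≤ x.length ∧ Reach target x) ∧
      InvB target (dfsGo target n cs h failed).2 := by
  intro cs
  induction cs with
  | nil => intro h failed hInv; rw [dfsGo]; simp [hInv]
  | cons cand rest ihcs =>
    intro h failed hInv
    have hr := IH cand (h cand List.mem_cons_self) failed hInv
    rw [dfsGo]
    split_ifs with hlen hfst
    · -- candidate long enough, recursive call returned true
      refine ⟨⟨fun _ => ⟨cand, List.mem_cons_self, hlen, hr.1.mp hfst⟩, fun _ => hfst⟩, hr.2⟩
    · -- candidate long enough, recursive call returned false
      have hnr : ¬ Reach target cand := fun hc => hfst (hr.1.mpr hc)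
      have hrec := ihcs (fun x hx => h x (List.mem_cons_of_mem _ hx)) _ hr.2
      rw [hrec.1]
      refine ⟨⟨fun ⟨x, hx, hp⟩ => ⟨x, List.mem_cons_of_mem _ hx, hp⟩, ?_⟩, hrec.2⟩
      rintro ⟨x, hx, hp⟩
      rcases List.mem_cons.mp hx with rfl | h2
      · exact absurd hp.2 hnr
      · exact ⟨x, h2, hp⟩
    · -- candidate too short, skipped
      have hrec := ihcs (fun x hx => h x (List.mem_cons_of_mem _ hx)) failed hInv
      rw [hrec.1]
      refine ⟨⟨fun ⟨x, hx, hp⟩ => ⟨x, List.mem_cons_of_mem _ hx, hp⟩, ?_⟩, hrec.2⟩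
      rintro ⟨x, hx, hp⟩
      rcases List.mem_cons.mp hx with rfl | h2
      · exact absurd hp.1 hlen
      · exact ⟨x, h2, hp⟩

lemma dfsB_eq_reach (target : List String) :
    ∀ n c, c.length ≤ n → ∀ failed, InvB target failed →
      ((dfsB target c failed).1 = true ↔ Reach target c) ∧ InvB target (dfsB target c failed).2 := by
  intro n
  induction n using Nat.strong_induction_on with
  | _ n ih =>
  intro c hc failed hInv
  rw [dfsB]
  split_ifs with h1 h2 h3 hfst
  · -- c already in failed
    exact ⟨iff_of_false (by simp) (hInv c h1), hInv⟩
  · -- c = target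
    exact ⟨iff_of_true (by simp) (Reach_iff.mpr (Or.inl h2)), hInv⟩
  · -- loop found a reachable candidate
    have hgo := dfsGo_eq_reach target c.length
      (fun x hx f hI => ih x.length (by omega) x le_rfl f hI)
      (candsB c) (fun x hx => candsB_length_lt hx) failed hInv
    refine ⟨iff_of_true hfst ?_, hgo.2⟩
    obtain ⟨x, hx, hxl, hxr⟩ := hgo.1.mp hfst
    exact Reach_iff.mpr (Or.inr ⟨h3, x, mem_candsB.mp hx, hxl, hxr⟩)
  · -- loop exhausted: c cannot reach target
    have hgo := dfsGo_eq_reach target c.length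
      (fun x hx f hI => ih x.length (by omega) x le_rfl f hI)
      (candsB c) (fun x hx => candsB_length_lt hx) failed hInv
    have hnr : ¬ Reach target c := by
      intro hr
      rcases Reach_iff.mp hr with rfl | ⟨_, x, hic, hxl, hxr⟩
      · exact h2 rfl
      · exact hfst (hgo.1.mpr ⟨x, mem_candsB.mpr hic, hxl, hxr⟩)
    refine ⟨iff_of_false (by simp) hnr, ?_⟩
    intro s hs
    rcases (PySem.Set.mem_add _ c s).mp hs with h | rfl
    · exact hgo.2 s h
    · exact hnr
  · -- c shorter than (or as short as) target and ≠ target: not reachable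
    have hnr : ¬ Reach target c := by
      intro hr
      rcases Reach_iff.mp hr with rfl | ⟨hl, _, _, _, _⟩
      · exact h2 rfl
      · omega
    refine ⟨iff_of_false (by simp) hnr, ?_⟩
    intro s hs
    rcases (PySem.Set.mem_add _ c s).mp hs with h | rfl
    · exact hInv s h
    · exact hnr

-- ===== VERDICT (by name: the statement is the Claim_ definition above) =====
theorem section_parts_can_reduce_to_py_spec : Claim_equal_section_parts_can_reduce_to_py := by
  intro parts target _
  unfold Spec_section_parts_can_reduce_to_py
  unfold section_parts_can_reduce_to_py section_parts_can_reduce_to_py_alt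
  split
  · rfl
  · split
    · rfl
    · have hA := bfsA_eq_reach target parts [parts] PySem.Set.empty
        (fun c hc => by rw [List.mem_singleton] at hc; exact hc ▸ List.Sublist.refl parts)
        ⟨by simp [PySem.Set.empty], by simp [PySem.Set.empty]⟩
      have hB := (dfsB_eq_reach target parts.length parts le_rfl PySem.Set.empty
        (by intro s hs; simp [PySem.Set.empty] at hs)).1
      rw [Bool.eq_iff_iff, hA, hB]
      simp
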